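-- pv_equiv track=rewrite | github.com/sg9372/DecisionIncAssesment | src/calculateNewRectangles.py | findNewIslands
-- ===== SOURCE A (Python) =====
-- def findNewIslands(island):
--     # Initialize variables
--     newIslands = []
--     currentIsland = []
--     for rectangle in island:
--         if rectangle[1]<=0:                     # Means this island is zero, need to split here.
--             if currentIsland:
--                 newIslands.append(currentIsland)
--                 currentIsland = []
--         else:                                   # Keep building current island with rectangles.
--             currentIsland.append(rectangle)
--     if currentIsland:                           # If an island in currentIsland, make sure to add it.
--         newIslands.append(currentIsland)
--
--     return newIslands
-- ===== SOURCE B (Python) =====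
-- def findNewIslands(island):
--     # Run-splitting scan over a shrinking suffix: drop one separator, or
--     # slice off the whole next run of positive rectangles as one island.
--     result = []
--     rest = island
--     while rest:
--         if rest[0][1] <= 0:
--             rest = rest[1:]
--         else:
--             j = 1
--             while j < len(rest) and rest[j][1] > 0:
--                 j += 1
--             result.append(rest[:j])
--             rest = rest[j:]
--     return result
-- ===== Notes on version B (the rewrite author's own statement) =====
-- stated objective: alternative
-- what changed: Replaces A's single fold carrying a currentIsland accumulator (flushed at separators and at the end) by a run-splitting scan over a shrinking suffix: drop a separator, or slice off the whole next run of positive rectangles in one step; no accumulator, no final flush.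
import Mathlib
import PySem

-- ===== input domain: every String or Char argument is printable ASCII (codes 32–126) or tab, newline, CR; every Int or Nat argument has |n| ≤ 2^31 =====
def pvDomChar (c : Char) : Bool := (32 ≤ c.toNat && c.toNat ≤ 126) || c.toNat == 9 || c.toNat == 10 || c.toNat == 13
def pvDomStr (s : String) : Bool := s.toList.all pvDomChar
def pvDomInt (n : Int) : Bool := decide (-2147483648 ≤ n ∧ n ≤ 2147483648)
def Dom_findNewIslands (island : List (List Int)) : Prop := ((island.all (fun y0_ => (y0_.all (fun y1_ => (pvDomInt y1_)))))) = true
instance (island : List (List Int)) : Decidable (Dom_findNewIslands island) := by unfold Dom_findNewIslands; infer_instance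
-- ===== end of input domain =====

-- B replaces A's accumulator-and-flush fold by a run-splitting scan over a shrinking suffix; same cost, different decomposition.
-- Python raises IndexError on rectangle[1] when a rectangle has fewer than 2 entries; Pre_ excludes exactly those inputs
-- (both ports read index 1 via pyGet?; the getD default is never reached inside Pre_).

-- ===== PORT A =====
-- rectangle[1] <= 0 : separator test; under Pre_ index 1 exists, so getD 0 is never the taken branch
def pvSep (r : List Int) : Bool := decide ((PySem.List.pyGet? r 1).getD 0 ≤ 0)

def findNewIslands (island : List (List Int)) : List (List (List Int)) :=
  -- for rectangle in island, carrying (newIslands, currentIsland)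
  let st := island.foldl
    (fun (acc : List (List (List Int)) × List (List Int)) rectangle =>
      if pvSep rectangle then
        if acc.2 ≠ [] then (acc.1 ++ [acc.2], []) else acc
      else
        (acc.1, acc.2 ++ [rectangle]))
    ([], [])
  if st.2 ≠ [] then st.1 ++ [st.2] else st.1

-- ===== PORT B =====
-- the outer while over the shrinking suffix `rest`; the inner `j` loop is the run
-- of positive rectangles, i.e. rest[:j] = r :: takeWhile positive, rest[j:] = dropWhile positive
def pvAltGo : List (List Int) → List (List (List Int))
  | [] => []
  | r :: rest =>
    if pvSep r then pvAltGo rest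
    else (r :: rest.takeWhile (fun x => !pvSep x)) :: pvAltGo (rest.dropWhile (fun x => !pvSep x))
termination_by l => l.length
decreasing_by
  · simp
  · exact Nat.lt_succ_of_le (List.length_dropWhile_le _ _)

def findNewIslands_alt (island : List (List Int)) : List (List (List Int)) :=
  pvAltGo island

-- ===== PRECONDITION & SPEC =====
-- Pre_ excludes exactly the inputs where A (and B) raise IndexError: a rectangle with fewer than 2 entries.
def Pre_findNewIslands (island : List (List Int)) : Prop := ∀ r ∈ island, 2 ≤ r.length
instance (island : List (List Int)) : Decidable (Pre_findNewIslands island) := by unfold Pre_findNewIslands; infer_instance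

def pvWitness_findNewIslands : List (List Int) := [[0, 1], [0, 0], [0, 2], [0, 3]]

def Spec_findNewIslands (island : List (List Int)) (out : List (List (List Int))) : Prop := out = findNewIslands_alt island
instance (island : List (List Int)) (out : List (List (List Int))) : Decidable (Spec_findNewIslands island out) := by unfold Spec_findNewIslands; infer_instance

-- ===== CLAIM (what is proved, stated in full; the proofs are below) =====
def Claim_equal_findNewIslands : Prop := ∀ (island : List (List Int)), Dom_findNewIslands island → Pre_findNewIslands island → Spec_findNewIslands island (findNewIslands island)

-- ===== LEMMAS AND PROOFS =====

-- reference recursion both ports are reduced to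
def pvSpecGo : List (List Int) → List (List Int) → List (List (List Int))
  | [], cur => if cur ≠ [] then [cur] else []
  | r :: rs, cur =>
    if pvSep r then (if cur ≠ [] then cur :: pvSpecGo rs [] else pvSpecGo rs [])
    else pvSpecGo rs (cur ++ [r])

theorem pvA_eq_spec (rs : List (List Int)) : ∀ (acc : List (List (List Int))) (cur : List (List Int)),
    (let st := rs.foldl
      (fun (acc : List (List (List Int)) × List (List Int)) rectangle =>
        if pvSep rectangle then
          if acc.2 ≠ [] then (acc.1 ++ [acc.2], []) else acc
        else
          (acc.1, acc.2 ++ [rectangle])) (acc, cur)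
     if st.2 ≠ [] then st.1 ++ [st.2] else st.1) = acc ++ pvSpecGo rs cur := by
  induction rs with
  | nil =>
    intro acc cur
    simp only [List.foldl_nil, pvSpecGo]
    split_ifs <;> simp
  | cons r rs ih =>
    intro acc cur
    simp only [List.foldl_cons, pvSpecGo]
    by_cases hs : pvSep r
    · by_cases hc : cur ≠ []
      · simpa [hs, hc, List.append_assoc] using ih (acc ++ [cur]) []
      · simp only [ne_eq, not_not] at hc
        simpa [hs, hc] using ih acc []
    · simpa [hs] using ih acc (cur ++ [r])

theorem pvSpec_pos (rs : List (List Int)) : ∀ (cur : List (List Int)), cur ≠ [] →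
    pvSpecGo rs cur =
      (cur ++ rs.takeWhile (fun x => !pvSep x)) :: pvSpecGo (rs.dropWhile (fun x => !pvSep x)) [] := by
  induction rs with
  | nil => intro cur hc; simp [pvSpecGo, hc]
  | cons r rs ih =>
    intro cur hc
    by_cases hs : pvSep r
    · simp [pvSpecGo, hs, hc]
    · simp only [pvSpecGo, hs, if_false, List.takeWhile_cons, List.dropWhile_cons,
        Bool.not_eq_true', Bool.not_false, if_true]
      rw [ih (cur ++ [r]) (by simp)]
      simp

theorem pvB_eq_spec (rs : List (List Int)) : pvAltGo rs = pvSpecGo rs [] := by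
  induction hn : rs.length using Nat.strong_induction_on generalizing rs with
  | _ n ih =>
    match rs with
    | [] => simp [pvAltGo, pvSpecGo]
    | r :: rest =>
      by_cases hs : pvSep r
      · rw [pvAltGo, if_pos hs]
        have := ih rest.length (by simp [← hn]) rest rfl
        simp [pvSpecGo, hs, this]
      · rw [pvAltGo, if_neg hs]
        have h1 : pvSpecGo (r :: rest) [] = pvSpecGo rest [r] := by simp [pvSpecGo, hs]
        rw [h1, pvSpec_pos rest [r] (by simp)]
        have hlen : (rest.dropWhile (fun x => !pvSep x)).length < n := by
          have := List.length_dropWhile_le (fun x => !pvSep x) rest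
          simp only [← hn, List.length_cons]; omega
        rw [ih _ hlen _ rfl]
        simp

-- ===== VERDICT (by name: the statement is the Claim_ definition above) =====
theorem findNewIslands_spec : Claim_equal_findNewIslands := by
  intro island _ _
  show findNewIslands island = findNewIslands_alt island
  unfold findNewIslands findNewIslands_alt
  rw [pvB_eq_spec]
  simpa using pvA_eq_spec island [] []
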